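-- pv_equiv track=rewrite | github.com/ljansen-iee/pypsa-rsa-sec | scripts/build_energy_totals_from_UCT.py | rename_description_to_subsector
-- ===== SOURCE A (Python) =====
-- def rename_description_to_subsector(description):
--     """ rename where useful for later assignments"""
--
--     if "rail" in description or "train" in description:
--         return "rail"
--     elif "aviation int" in description:
--         return "international aviation"
--     elif "aviation" in description:
--         return "domestic aviation"
--     elif any(x in description for x in ["hcv", "lcv", "brt", "bus", "car", "moto priv.", "suv"]):
--         return "road"
--     elif "space" in description:
--         return "space"
--     elif "water" in description:
--         return "water"
--     elif "cooking" in description: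
--         return "cooking"
--     elif "ammonia plant" in description:
--         return "ammonia"
--     elif "chemical" in description:
--         return "chemical and petrochemical"
--     elif "..." in description:
--         return "construction"
--     elif "food" in description:
--         return "food and tobacco"
--     elif "iron" in description or "ferr" in description:
--         return "iron and steel"
--     # elif "..." in description:
--     #     return "machinery"
--     elif "mining" in description or "mine and refine" in description:
--         return "mining and quarrying"
--     elif "non-ferrous" in description or "aluminium" in description:
--         return "non-ferrous metals"
--     elif "minerals" in description:
--         return "non-metallic minerals"
--     elif "paper" in description:
--         return "paper pulp and print"
--     elif "other" in description:
--         return "other"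
--     elif "electr" in description:
--         return "electricity"
--     elif "refinery ctl" in description:
--         return "refinery ctl"
--     elif "refinery crude oil" in description:
--         return "refinery crude oil"
--     elif "biofuel refinery" in description:
--         return "refinery biofuel"
--     else:
--         return description
-- ===== SOURCE B (Python) =====
-- # B: instead of a first-match if/elif chain, collect ALL matching keywords in one
-- # filtering pass and pick the one with the lowest priority; equal-priority keywords
-- # carry the same label, so min() over (priority, label) pairs reproduces A's order.
-- KEYWORDS = [
--     ("rail", 0, "rail"), ("train", 0, "rail"),
--     ("aviation int", 1, "international aviation"),
--     ("aviation", 2, "domestic aviation"),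
--     ("hcv", 3, "road"), ("lcv", 3, "road"), ("brt", 3, "road"), ("bus", 3, "road"),
--     ("car", 3, "road"), ("moto priv.", 3, "road"), ("suv", 3, "road"),
--     ("space", 4, "space"),
--     ("water", 5, "water"),
--     ("cooking", 6, "cooking"),
--     ("ammonia plant", 7, "ammonia"),
--     ("chemical", 8, "chemical and petrochemical"),
--     ("...", 9, "construction"),
--     ("food", 10, "food and tobacco"),
--     ("iron", 11, "iron and steel"), ("ferr", 11, "iron and steel"),
--     ("mining", 12, "mining and quarrying"), ("mine and refine", 12, "mining and quarrying"),
--     ("non-ferrous", 13, "non-ferrous metals"), ("aluminium", 13, "non-ferrous metals"),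
--     ("minerals", 14, "non-metallic minerals"),
--     ("paper", 15, "paper pulp and print"),
--     ("other", 16, "other"),
--     ("electr", 17, "electricity"),
--     ("refinery ctl", 18, "refinery ctl"),
--     ("refinery crude oil", 19, "refinery crude oil"),
--     ("biofuel refinery", 20, "refinery biofuel"),
-- ]
--
--
-- def rename_description_to_subsector(description):
--     """rename where useful for later assignments"""
--     hits = [(priority, label) for keyword, priority, label in KEYWORDS
--             if keyword in description]
--     return min(hits)[1] if hits else description
-- ===== Notes on version B (the rewrite author's own statement) =====
-- stated objective: alternative
-- what changed: Instead of an early-return first-match if/elif chain, B filters all matching keywords from a priority-annotated keyword table in one pass and returns the label of the minimum (priority,label) pair, with the input as default when nothing matches.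
import Mathlib
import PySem

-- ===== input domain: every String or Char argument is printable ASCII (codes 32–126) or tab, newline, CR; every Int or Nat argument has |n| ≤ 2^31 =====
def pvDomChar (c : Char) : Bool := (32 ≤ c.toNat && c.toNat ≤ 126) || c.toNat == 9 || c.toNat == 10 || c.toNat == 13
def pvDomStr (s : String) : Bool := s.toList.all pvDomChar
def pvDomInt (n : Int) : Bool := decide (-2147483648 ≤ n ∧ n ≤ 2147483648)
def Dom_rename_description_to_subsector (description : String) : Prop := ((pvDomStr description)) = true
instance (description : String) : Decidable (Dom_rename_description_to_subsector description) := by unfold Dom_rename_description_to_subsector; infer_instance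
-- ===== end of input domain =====

-- B replaces the early-return if/elif chain by collect-all-matches + minimum priority (objective: alternative).

-- ===== PORT A =====
def rename_description_to_subsector (description : String) : String :=
  if PySem.Str.isIn "rail" description || PySem.Str.isIn "train" description then "rail"
  else if PySem.Str.isIn "aviation int" description then "international aviation"
  else if PySem.Str.isIn "aviation" description then "domestic aviation"
  else if ["hcv", "lcv", "brt", "bus", "car", "moto priv.", "suv"].any
      (fun x => PySem.Str.isIn x description) then "road"
  else if PySem.Str.isIn "space" description then "space"
  else if PySem.Str.isIn "water" description then "water"
  else if PySem.Str.isIn "cooking" description then "cooking"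
  else if PySem.Str.isIn "ammonia plant" description then "ammonia"
  else if PySem.Str.isIn "chemical" description then "chemical and petrochemical"
  else if PySem.Str.isIn "..." description then "construction"
  else if PySem.Str.isIn "food" description then "food and tobacco"
  else if PySem.Str.isIn "iron" description || PySem.Str.isIn "ferr" description then "iron and steel"
  else if PySem.Str.isIn "mining" description || PySem.Str.isIn "mine and refine" description then "mining and quarrying"
  else if PySem.Str.isIn "non-ferrous" description || PySem.Str.isIn "aluminium" description then "non-ferrous metals"
  else if PySem.Str.isIn "minerals" description then "non-metallic minerals"
  else if PySem.Str.isIn "paper" description then "paper pulp and print"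
  else if PySem.Str.isIn "other" description then "other"
  else if PySem.Str.isIn "electr" description then "electricity"
  else if PySem.Str.isIn "refinery ctl" description then "refinery ctl"
  else if PySem.Str.isIn "refinery crude oil" description then "refinery crude oil"
  else if PySem.Str.isIn "biofuel refinery" description then "refinery biofuel"
  else description

-- ===== PORT B =====
-- the priority-annotated keyword table of Source B (keyword, priority, label)
def pvKeywords : List (String × Nat × String) :=
  [ ("rail", 0, "rail"), ("train", 0, "rail"),
    ("aviation int", 1, "international aviation"),
    ("aviation", 2, "domestic aviation"),
    ("hcv", 3, "road"), ("lcv", 3, "road"), ("brt", 3, "road"), ("bus", 3, "road"),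
    ("car", 3, "road"), ("moto priv.", 3, "road"), ("suv", 3, "road"),
    ("space", 4, "space"),
    ("water", 5, "water"),
    ("cooking", 6, "cooking"),
    ("ammonia plant", 7, "ammonia"),
    ("chemical", 8, "chemical and petrochemical"),
    ("...", 9, "construction"),
    ("food", 10, "food and tobacco"),
    ("iron", 11, "iron and steel"), ("ferr", 11, "iron and steel"),
    ("mining", 12, "mining and quarrying"), ("mine and refine", 12, "mining and quarrying"),
    ("non-ferrous", 13, "non-ferrous metals"), ("aluminium", 13, "non-ferrous metals"),
    ("minerals", 14, "non-metallic minerals"),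
    ("paper", 15, "paper pulp and print"),
    ("other", 16, "other"),
    ("electr", 17, "electricity"),
    ("refinery ctl", 18, "refinery ctl"),
    ("refinery crude oil", 19, "refinery crude oil"),
    ("biofuel refinery", 20, "refinery biofuel") ]

-- Python's '<' on strings: lexicographic by code points
def pvStrLt : List Char → List Char → Bool
  | [], [] => false
  | [], _ :: _ => true
  | _ :: _, [] => false
  | x :: xs, y :: ys => if x < y then true else if y < x then false else pvStrLt xs ys

-- Python's '<' on (int, str) tuples: lexicographic
def pvLtPair (a b : Nat × String) : Bool := a.1 < b.1 || (a.1 == b.1 && pvStrLt a.2.toList b.2.toList)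

-- Python's min over a nonempty list: fold keeping the first minimal element
def pvMinFold (acc : Nat × String) : List (Nat × String) → Nat × String
  | [] => acc
  | x :: xs => pvMinFold (if pvLtPair x acc then x else acc) xs

def rename_description_to_subsector_alt (description : String) : String :=
  match (pvKeywords.filter (fun e => PySem.Str.isIn e.1 description)).map (fun e => e.2) with
  | [] => description
  | h :: t => (pvMinFold h t).2

-- ===== PRECONDITION & SPEC =====
def Spec_rename_description_to_subsector (description : String) (out : String) : Prop := out = rename_description_to_subsector_alt description
instance (description : String) (out : String) : Decidable (Spec_rename_description_to_subsector description out) := by unfold Spec_rename_description_to_subsector; infer_instance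

-- ===== CLAIM (what is proved, stated in full; the proofs are below) =====
def Claim_equal_rename_description_to_subsector : Prop := ∀ (description : String), Dom_rename_description_to_subsector description → Spec_rename_description_to_subsector description (rename_description_to_subsector description)

-- ===== LEMMAS AND PROOFS =====

-- If nothing in the tail beats the accumulator, the fold returns the accumulator.
theorem pvMinFold_of_none_lt (t : List (Nat × String)) (h : Nat × String)
    (hle : ∀ x ∈ t, pvLtPair x h = false) : pvMinFold h t = h := by
  induction t with
  | nil => rfl
  | cons x xs ih =>
      have hx : pvLtPair x h = false := hle x (by simp)
      simp only [pvMinFold, hx, Bool.false_eq_true, if_false]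
      exact ih (fun y hy => hle y (by simp [hy]))

-- the keyword table is sorted: no later (priority,label) pair is strictly less than an earlier one
theorem pvKeywords_sorted :
    pvKeywords.Pairwise (fun a b => pvLtPair b.2 a.2 = false) := by
  unfold pvKeywords pvLtPair
  decide

-- find? is the head of filter
theorem find?_eq_head?_filter' {α : Type} (p : α → Bool) (l : List α) :
    l.find? p = (l.filter p).head? := by
  induction l with
  | nil => rfl
  | cons x xs ih =>
      rw [List.find?_cons, List.filter_cons]
      cases hx : p x
      · simp only [Option.some.injEq, List.head?_cons] at *
        exact ih
      · simp

-- B returns the label of the FIRST matching keyword (= find?), since the table is priority-sorted.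
theorem alt_eq_find (d : String) :
    rename_description_to_subsector_alt d =
      match pvKeywords.find? (fun e => PySem.Str.isIn e.1 d) with
      | some e => e.2.2
      | none => d := by
  unfold rename_description_to_subsector_alt
  have hpw : (pvKeywords.filter (fun e => PySem.Str.isIn e.1 d)).Pairwise
      (fun a b => pvLtPair b.2 a.2 = false) := pvKeywords_sorted.filter _
  rw [find?_eq_head?_filter']
  cases hf : pvKeywords.filter (fun e => PySem.Str.isIn e.1 d) with
  | nil => simp
  | cons e es =>
      rw [hf] at hpw
      have : pvMinFold e.2 (es.map (fun e => e.2)) = e.2 := by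
        apply pvMinFold_of_none_lt
        intro x hx
        rcases List.mem_map.mp hx with ⟨y, hy, rfl⟩
        exact (List.pairwise_cons.mp hpw).1 y hy
      simp [this]

-- ===== VERDICT (by name: the statement is the Claim_ definition above) =====
theorem rename_description_to_subsector_spec : Claim_equal_rename_description_to_subsector := by
  intro d _
  unfold Spec_rename_description_to_subsector
  rw [alt_eq_find]
  unfold rename_description_to_subsector
  by_cases h1 : PySem.Chars.isIn ['r', 'a', 'i', 'l'] d.toList
  · simp [pvKeywords, List.find?, *]
  by_cases h2 : PySem.Chars.isIn ['t', 'r', 'a', 'i', 'n'] d.toList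
  · simp [pvKeywords, List.find?, *]
  by_cases h3 : PySem.Chars.isIn ['a', 'v', 'i', 'a', 't', 'i', 'o', 'n', ' ', 'i', 'n', 't'] d.toList
  · simp [pvKeywords, List.find?, *]
  by_cases h4 : PySem.Chars.isIn ['a', 'v', 'i', 'a', 't', 'i', 'o', 'n'] d.toList
  · simp [pvKeywords, List.find?, *]
  by_cases h5 : PySem.Chars.isIn ['h', 'c', 'v'] d.toList
  · simp [pvKeywords, List.find?, *]
  by_cases h6 : PySem.Chars.isIn ['l', 'c', 'v'] d.toList
  · simp [pvKeywords, List.find?, *]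
  by_cases h7 : PySem.Chars.isIn ['b', 'r', 't'] d.toList
  · simp [pvKeywords, List.find?, *]
  by_cases h8 : PySem.Chars.isIn ['b', 'u', 's'] d.toList
  · simp [pvKeywords, List.find?, *]
  by_cases h9 : PySem.Chars.isIn ['c', 'a', 'r'] d.toList
  · simp [pvKeywords, List.find?, *]
  by_cases h10 : PySem.Chars.isIn ['m', 'o', 't', 'o', ' ', 'p', 'r', 'i', 'v', '.'] d.toList
  · simp [pvKeywords, List.find?, *]
  by_cases h11 : PySem.Chars.isIn ['s', 'u', 'v'] d.toList
  · simp [pvKeywords, List.find?, *]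
  by_cases h12 : PySem.Chars.isIn ['s', 'p', 'a', 'c', 'e'] d.toList
  · simp [pvKeywords, List.find?, *]
  by_cases h13 : PySem.Chars.isIn ['w', 'a', 't', 'e', 'r'] d.toList
  · simp [pvKeywords, List.find?, *]
  by_cases h14 : PySem.Chars.isIn ['c', 'o', 'o', 'k', 'i', 'n', 'g'] d.toList
  · simp [pvKeywords, List.find?, *]
  by_cases h15 : PySem.Chars.isIn ['a', 'm', 'm', 'o', 'n', 'i', 'a', ' ', 'p', 'l', 'a', 'n', 't'] d.toList
  · simp [pvKeywords, List.find?, *]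
  by_cases h16 : PySem.Chars.isIn ['c', 'h', 'e', 'm', 'i', 'c', 'a', 'l'] d.toList
  · simp [pvKeywords, List.find?, *]
  by_cases h17 : PySem.Chars.isIn ['.', '.', '.'] d.toList
  · simp [pvKeywords, List.find?, *]
  by_cases h18 : PySem.Chars.isIn ['f', 'o', 'o', 'd'] d.toList
  · simp [pvKeywords, List.find?, *]
  by_cases h19 : PySem.Chars.isIn ['i', 'r', 'o', 'n'] d.toList
  · simp [pvKeywords, List.find?, *]
  by_cases h20 : PySem.Chars.isIn ['f', 'e', 'r', 'r'] d.toList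
  · simp [pvKeywords, List.find?, *]
  by_cases h21 : PySem.Chars.isIn ['m', 'i', 'n', 'i', 'n', 'g'] d.toList
  · simp [pvKeywords, List.find?, *]
  by_cases h22 : PySem.Chars.isIn ['m', 'i', 'n', 'e', ' ', 'a', 'n', 'd', ' ', 'r', 'e', 'f', 'i', 'n', 'e'] d.toList
  · simp [pvKeywords, List.find?, *]
  by_cases h23 : PySem.Chars.isIn ['n', 'o', 'n', '-', 'f', 'e', 'r', 'r', 'o', 'u', 's'] d.toList
  · simp [pvKeywords, List.find?, *]
  by_cases h24 : PySem.Chars.isIn ['a', 'l', 'u', 'm', 'i', 'n', 'i', 'u', 'm'] d.toList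
  · simp [pvKeywords, List.find?, *]
  by_cases h25 : PySem.Chars.isIn ['m', 'i', 'n', 'e', 'r', 'a', 'l', 's'] d.toList
  · simp [pvKeywords, List.find?, *]
  by_cases h26 : PySem.Chars.isIn ['p', 'a', 'p', 'e', 'r'] d.toList
  · simp [pvKeywords, List.find?, *]
  by_cases h27 : PySem.Chars.isIn ['o', 't', 'h', 'e', 'r'] d.toList
  · simp [pvKeywords, List.find?, *]
  by_cases h28 : PySem.Chars.isIn ['e', 'l', 'e', 'c', 't', 'r'] d.toList
  · simp [pvKeywords, List.find?, *]
  by_cases h29 : PySem.Chars.isIn ['r', 'e', 'f', 'i', 'n', 'e', 'r', 'y', ' ', 'c', 't', 'l'] d.toList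
  · simp [pvKeywords, List.find?, *]
  by_cases h30 : PySem.Chars.isIn ['r', 'e', 'f', 'i', 'n', 'e', 'r', 'y', ' ', 'c', 'r', 'u', 'd', 'e', ' ', 'o', 'i', 'l'] d.toList
  · simp [pvKeywords, List.find?, *]
  by_cases h31 : PySem.Chars.isIn ['b', 'i', 'o', 'f', 'u', 'e', 'l', ' ', 'r', 'e', 'f', 'i', 'n', 'e', 'r', 'y'] d.toList
  · simp [pvKeywords, List.find?, *]
  simp [pvKeywords, List.find?, *]
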